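-- pv_equiv track=rewrite | github.com/przemo-stefo/ListingBuilderPro | listing_builder/backend/services/listing_diff_service.py | _diff_images
-- ===== SOURCE A (Python) =====
-- def _diff_images(old_images: list, new_images: list) -> list[dict]:
--     """Compare image URL lists. Detects main image change, added, removed."""
--     changes: list[dict] = []
--
--     if not old_images and not new_images:
--         return changes
--
--     # Main image change (first URL)
--     old_main = old_images[0] if old_images else None
--     new_main = new_images[0] if new_images else None
--     if old_main and new_main and old_main != new_main:
--         changes.append({
--             "change_type": "images",
--             "field_name": "image_main",
--             "old_value": old_main,
--             "new_value": new_main,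
--         })
--
--     old_set = set(old_images)
--     new_set = set(new_images)
--
--     for url in sorted(new_set - old_set):
--         # WHY skip main: Already reported above if main changed
--         if url == new_main and old_main and old_main != new_main:
--             continue
--         changes.append({
--             "change_type": "images",
--             "field_name": "image_added",
--             "old_value": None,
--             "new_value": url,
--         })
--
--     for url in sorted(old_set - new_set):
--         if url == old_main and old_main and old_main != new_main:
--             continue
--         changes.append({
--             "change_type": "images",
--             "field_name": "image_removed",
--             "old_value": url,
--             "new_value": None,
--         })
--
--     return changes
-- ===== SOURCE B (Python) =====
-- def _diff_images(old_images: list, new_images: list) -> list[dict]: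
--     """Diff via one two-pointer merge over the sorted deduped lists
--     instead of two set differences each sorted separately."""
--     old_main = old_images[0] if old_images else None
--     new_main = new_images[0] if new_images else None
--     main_changed = bool(old_main and new_main and old_main != new_main)
--
--     sorted_old = sorted(set(old_images))
--     sorted_new = sorted(set(new_images))
--
--     removed, added = [], []
--     i = j = 0
--     while i < len(sorted_old) and j < len(sorted_new):
--         if sorted_old[i] == sorted_new[j]:
--             i += 1
--             j += 1
--         elif sorted_old[i] < sorted_new[j]:
--             removed.append(sorted_old[i])
--             i += 1
--         else:
--             added.append(sorted_new[j])
--             j += 1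
--     removed.extend(sorted_old[i:])
--     added.extend(sorted_new[j:])
--
--     changes = []
--     if main_changed:
--         changes.append({
--             "change_type": "images",
--             "field_name": "image_main",
--             "old_value": old_main,
--             "new_value": new_main,
--         })
--     changes.extend({
--         "change_type": "images",
--         "field_name": "image_added",
--         "old_value": None,
--         "new_value": url,
--     } for url in added
--         if not (url == new_main and old_main and old_main != new_main))
--     changes.extend({
--         "change_type": "images",
--         "field_name": "image_removed",
--         "old_value": url,
--         "new_value": None,
--     } for url in removed
--         if not (url == old_main and old_main and old_main != new_main))
--     return changes
-- ===== Notes on version B (the rewrite author's own statement) =====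
-- stated objective: alternative
-- what changed: B deduplicates and sorts both URL lists once and computes added/removed with a single two-pointer merge walk emitted via comprehensions, instead of A's two set differences each sorted separately and appended in skip-loops.
import Mathlib
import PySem

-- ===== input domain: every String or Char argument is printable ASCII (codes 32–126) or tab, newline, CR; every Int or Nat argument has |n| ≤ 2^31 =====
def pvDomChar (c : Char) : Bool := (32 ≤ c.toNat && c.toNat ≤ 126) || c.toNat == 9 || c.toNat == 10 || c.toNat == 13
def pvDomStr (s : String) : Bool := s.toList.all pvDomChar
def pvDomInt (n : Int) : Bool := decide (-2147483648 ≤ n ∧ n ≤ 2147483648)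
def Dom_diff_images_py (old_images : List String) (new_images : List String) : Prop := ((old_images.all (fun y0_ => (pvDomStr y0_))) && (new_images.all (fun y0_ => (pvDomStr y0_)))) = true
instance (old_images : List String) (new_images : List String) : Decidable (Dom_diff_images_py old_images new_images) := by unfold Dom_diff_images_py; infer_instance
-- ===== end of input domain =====

-- B replaces the two set differences (each sorted separately) by one two-pointer
-- merge of the sorted deduplicated URL lists; same records, same order (objective: alternative).

-- Python truthiness of `old_main` / `new_main` (None or "" are falsy)
def optStrTruthy : Option String → Bool
  | none => false
  | some s => !(s == "")

-- ===== PORT A =====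
def diff_images_py (old_images : List String) (new_images : List String) : List (List (String × Option String)) :=
  if old_images = [] ∧ new_images = [] then []
  else
    let old_main : Option String := old_images.head?
    let new_main : Option String := new_images.head?
    let changes : List (List (String × Option String)) :=
      if optStrTruthy old_main && optStrTruthy new_main && (old_main != new_main) then
        [[("change_type", some "images"), ("field_name", some "image_main"),
          ("old_value", old_main), ("new_value", new_main)]]
      else []
    let old_set := PySem.Set.ofList old_images
    let new_set := PySem.Set.ofList new_images
    let changes :=
      (PySem.List.sorted (PySem.Set.diff new_set old_set) (fun x => x)).foldl
        (fun acc url =>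
          if (some url == new_main) && optStrTruthy old_main && (old_main != new_main) then acc
          else acc ++ [[("change_type", some "images"), ("field_name", some "image_added"),
                        ("old_value", none), ("new_value", some url)]]) changes
    (PySem.List.sorted (PySem.Set.diff old_set new_set) (fun x => x)).foldl
      (fun acc url =>
        if (some url == old_main) && optStrTruthy old_main && (old_main != new_main) then acc
        else acc ++ [[("change_type", some "images"), ("field_name", some "image_removed"),
                      ("old_value", some url), ("new_value", none)]]) changes

-- ===== PORT B =====
-- the two-pointer merge walk of Source B: returns (removed, added)
def mergeDiff : List String → List String → List String × List String
  | [], bs => ([], bs)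
  | a :: as, [] => (a :: as, [])
  | a :: as, b :: bs =>
    if a = b then mergeDiff as bs
    else if a < b then
      let p := mergeDiff as (b :: bs)
      (a :: p.1, p.2)
    else
      let p := mergeDiff (a :: as) bs
      (p.1, b :: p.2)
termination_by a b => a.length + b.length
decreasing_by all_goals simp only [List.length_cons] <;> omega

def diff_images_py_alt (old_images : List String) (new_images : List String) : List (List (String × Option String)) :=
  let old_main : Option String := old_images.head?
  let new_main : Option String := new_images.head?
  let main_changed := optStrTruthy old_main && optStrTruthy new_main && (old_main != new_main)
  let sorted_old := PySem.List.sorted (PySem.Set.ofList old_images) (fun x => x)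
  let sorted_new := PySem.List.sorted (PySem.Set.ofList new_images) (fun x => x)
  let rm_add := mergeDiff sorted_old sorted_new
  let changes : List (List (String × Option String)) :=
    if main_changed then
      [[("change_type", some "images"), ("field_name", some "image_main"),
        ("old_value", old_main), ("new_value", new_main)]]
    else []
  let changes := changes ++
    (rm_add.2.filter (fun url =>
        !((some url == new_main) && optStrTruthy old_main && (old_main != new_main)))).map
      (fun url => [("change_type", some "images"), ("field_name", some "image_added"),
                   ("old_value", none), ("new_value", some url)])
  changes ++
    (rm_add.1.filter (fun url =>
        !((some url == old_main) && optStrTruthy old_main && (old_main != new_main)))).map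
      (fun url => [("change_type", some "images"), ("field_name", some "image_removed"),
                   ("old_value", some url), ("new_value", none)])

-- ===== PRECONDITION & SPEC =====
def Spec_diff_images_py (old_images : List String) (new_images : List String) (out : List (List (String × Option String))) : Prop := out = diff_images_py_alt old_images new_images
instance (old_images : List String) (new_images : List String) (out : List (List (String × Option String))) : Decidable (Spec_diff_images_py old_images new_images out) := by unfold Spec_diff_images_py; infer_instance

-- ===== CLAIM (what is proved, stated in full; the proofs are below) =====
def Claim_equal_diff_images_py : Prop := ∀ (old_images : List String) (new_images : List String), Dom_diff_images_py old_images new_images → Spec_diff_images_py old_images new_images (diff_images_py old_images new_images)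

-- ===== LEMMAS AND PROOFS =====

-- a skip-loop is a filter-then-map
theorem foldl_skip {α β : Type} (p : α → Bool) (f : α → β) :
    ∀ (l : List α) (acc : List β),
      l.foldl (fun acc x => if p x then acc else acc ++ [f x]) acc
        = acc ++ (l.filter (fun x => !p x)).map f := by
  intro l
  induction l with
  | nil => intro acc; simp
  | cons a l ih =>
    intro acc
    by_cases h : p a = true <;> simp [List.foldl_cons, h, ih]

-- the merge walk on strictly increasing lists computes the two difference filters
theorem mergeDiff_eq : ∀ (a b : List String),
    a.Pairwise (· < ·) → b.Pairwise (· < ·) →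
    mergeDiff a b = (a.filter (fun x => !decide (x ∈ b)), b.filter (fun x => !decide (x ∈ a))) := by
  intro a
  induction a with
  | nil => intro b _ _; simp [mergeDiff]
  | cons a as iha =>
    intro b
    induction b with
    | nil => intro _ _; simp [mergeDiff]
    | cons b bs ihb =>
      intro ha hb
      rcases List.pairwise_cons.mp ha with ⟨ha1, ha2⟩
      rcases List.pairwise_cons.mp hb with ⟨hb1, hb2⟩
      rw [mergeDiff]
      by_cases heq : a = b
      · subst heq
        rw [if_pos rfl, iha bs ha2 hb2]
        have c1 : ∀ x ∈ as, (!decide (x ∈ a :: bs)) = (!decide (x ∈ bs)) := fun x hx => by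
          have hne : x ≠ a := ne_of_gt (ha1 x hx)
          simp [hne]
        have c2 : ∀ x ∈ bs, (!decide (x ∈ a :: as)) = (!decide (x ∈ as)) := fun x hx => by
          have hne : x ≠ a := ne_of_gt (hb1 x hx)
          simp [hne]
        have e1 : (a :: as).filter (fun x => !decide (x ∈ a :: bs))
            = as.filter (fun x => !decide (x ∈ bs)) := by
          rw [List.filter_cons, List.filter_congr c1]
          simp
        have e2 : (a :: bs).filter (fun x => !decide (x ∈ a :: as))
            = bs.filter (fun x => !decide (x ∈ as)) := by
          rw [List.filter_cons, List.filter_congr c2]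
          simp
        rw [e1, e2]
      · rw [if_neg heq]
        by_cases hlt : a < b
        · rw [if_pos hlt, iha (b :: bs) ha2 hb]
          have hab : a ∉ b :: bs := by
            intro hmem
            rcases List.mem_cons.mp hmem with h | h
            · exact heq h
            · exact absurd (lt_trans hlt (hb1 a h)) (lt_irrefl a)
          have e1 : (a :: as).filter (fun x => !decide (x ∈ b :: bs))
              = a :: as.filter (fun x => !decide (x ∈ b :: bs)) := by
            rw [List.filter_cons]
            simp [hab]
          have e2 : (b :: bs).filter (fun x => !decide (x ∈ a :: as))
              = (b :: bs).filter (fun x => !decide (x ∈ as)) := by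
            refine List.filter_congr (fun x hx => ?_)
            have hne : x ≠ a := by
              rcases List.mem_cons.mp hx with h | h
              · subst h; exact fun he => heq he.symm
              · exact ne_of_gt (lt_trans hlt (hb1 x h))
            simp [hne]
          rw [e1, e2]
        · rw [if_neg hlt]
          have hgt : b < a := by
            rcases lt_trichotomy a b with h | h | h
            · exact absurd h hlt
            · exact absurd h heq
            · exact h
          rw [ihb ha hb2]
          have e1 : (a :: as).filter (fun x => !decide (x ∈ b :: bs))
              = (a :: as).filter (fun x => !decide (x ∈ bs)) := by
            refine List.filter_congr (fun x hx => ?_)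
            have hne : x ≠ b := by
              rcases List.mem_cons.mp hx with h | h
              · subst h; exact heq
              · exact ne_of_gt (lt_trans hgt (ha1 x h))
            simp [hne]
          have e2 : (b :: bs).filter (fun x => !decide (x ∈ a :: as))
              = b :: bs.filter (fun x => !decide (x ∈ a :: as)) := by
            have hba : b ∉ a :: as := by
              intro hmem
              rcases List.mem_cons.mp hmem with h | h
              · exact heq h.symm
              · exact absurd (lt_trans hgt (ha1 b h)) (lt_irrefl b)
            rw [List.filter_cons]
            simp [hba]
          rw [e1, e2]

theorem sorted_diff (xs ys : List String) :
    PySem.List.sorted (PySem.Set.diff (PySem.Set.ofList xs) (PySem.Set.ofList ys)) (fun x => x)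
      = (PySem.List.sorted (PySem.Set.ofList xs) (fun x => x)).filter
          (fun u => !decide (u ∈ PySem.Set.ofList ys)) := by
  apply PySem.List.sorted_eq_of_perm_of_pairwise_lt
  · have hp : (PySem.List.sorted (PySem.Set.ofList xs) (fun x => x)).Perm (PySem.Set.ofList xs) :=
      PySem.List.sorted_perm _ _ _
    have hf := hp.filter (fun u => !decide (u ∈ PySem.Set.ofList ys))
    refine hf.trans ?_
    have he : (PySem.Set.ofList xs).filter (fun u => !decide (u ∈ PySem.Set.ofList ys))
        = PySem.Set.diff (PySem.Set.ofList xs) (PySem.Set.ofList ys) := by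
      unfold PySem.Set.diff
      refine List.filter_congr (fun x _ => ?_)
      have := PySem.Set.contains_iff (PySem.Set.ofList ys) x
      by_cases hm : x ∈ PySem.Set.ofList ys <;> simp_all
    rw [he]
  · exact (PySem.List.sorted_ofList_pairwise_lt xs).filter _

theorem merge_spec (xs ys : List String) :
    mergeDiff (PySem.List.sorted (PySem.Set.ofList xs) (fun x => x))
              (PySem.List.sorted (PySem.Set.ofList ys) (fun x => x))
      = (PySem.List.sorted (PySem.Set.diff (PySem.Set.ofList xs) (PySem.Set.ofList ys)) (fun x => x),
         PySem.List.sorted (PySem.Set.diff (PySem.Set.ofList ys) (PySem.Set.ofList xs)) (fun x => x)) := by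
  rw [mergeDiff_eq _ _ (PySem.List.sorted_ofList_pairwise_lt xs) (PySem.List.sorted_ofList_pairwise_lt ys)]
  rw [sorted_diff, sorted_diff]
  have e1 : (PySem.List.sorted (PySem.Set.ofList xs) (fun x => x)).filter
        (fun x => !decide (x ∈ PySem.List.sorted (PySem.Set.ofList ys) (fun x => x)))
      = (PySem.List.sorted (PySem.Set.ofList xs) (fun x => x)).filter
        (fun u => !decide (u ∈ PySem.Set.ofList ys)) :=
    List.filter_congr (fun x _ => by simp [PySem.List.mem_sorted])
  have e2 : (PySem.List.sorted (PySem.Set.ofList ys) (fun x => x)).filter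
        (fun x => !decide (x ∈ PySem.List.sorted (PySem.Set.ofList xs) (fun x => x)))
      = (PySem.List.sorted (PySem.Set.ofList ys) (fun x => x)).filter
        (fun u => !decide (u ∈ PySem.Set.ofList xs)) :=
    List.filter_congr (fun x _ => by simp [PySem.List.mem_sorted])
  rw [e1, e2]

-- ===== VERDICT (by name: the statement is the Claim_ definition above) =====
theorem diff_images_py_spec : Claim_equal_diff_images_py := by
  intro old_images new_images _
  unfold Spec_diff_images_py
  by_cases h : old_images = [] ∧ new_images = []
  · rcases h with ⟨h1, h2⟩
    subst h1; subst h2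
    have hnil : PySem.List.sorted ([] : List String) (fun x => x) = [] := by
      simp [PySem.List.sorted_eq_nil_iff]
    simp [diff_images_py, diff_images_py_alt, hnil, mergeDiff]
  · simp only [diff_images_py, diff_images_py_alt, if_neg h, foldl_skip, merge_spec]
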